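-- pv_equiv track=rewrite | github.com/tgkei/Algorithm_study | by_python/kakao/2020-2/1.py | solution
-- ===== SOURCE A (Python) =====
-- def solution(new_id):
--     answer = ''
--     new_id = new_id.lower()
--     n = len(new_id)
--
--     for i in range(n):
--         if new_id[i].isalnum():
--             answer += new_id[i]
--         elif new_id[i] in ['-', '_', '.']:
--             answer += new_id[i]
--
--     tmp = ""
--     idx = 0
--
--     while idx < len(answer):
--         if answer[idx] == '.':
--             tmp += answer[idx]
--             idx += 1
--             while idx < len(answer) and answer[idx] == '.':
--                 idx += 1
--         else:
--             tmp += answer[idx]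
--             idx += 1
--
--     if tmp and tmp[0] == '.':
--         if len(tmp) == 1:
--             tmp = ""
--         else:
--             tmp = tmp[1:]
--     if tmp and tmp[-1] == '.':
--         if len(tmp) == 1:
--             tmp = ""
--         else:
--             tmp = tmp[:-1]
--
--     if not tmp:
--         tmp = "a"
--
--     if len(tmp) >= 16:
--         tmp = tmp[:15]
--     if tmp[-1] == '.':
--         tmp = tmp[:-1]
--
--     answer = list(tmp)
--     while len(answer) <= 2:
--         answer.append(tmp[-1])
--
--     return ''.join(answer)
-- ===== SOURCE B (Python) =====
-- def solution(new_id):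
--     out = []
--     for c in new_id.lower():
--         if len(out) == 15:
--             break
--         if c.isalnum() or c in '-_.':
--             if c == '.' and (not out or out[-1] == '.'):
--                 continue
--             out.append(c)
--     while out and out[-1] == '.':
--         out.pop()
--     if not out:
--         out = ['a']
--     while len(out) < 3:
--         out.append(out[-1])
--     return ''.join(out)
-- ===== Notes on version B (the rewrite author's own statement) =====
-- stated objective: simpler
-- what changed: A's staged passes (filter loop, index-based dot-collapsing while-loop, separate leading and trailing one-dot strips with length-1 special cases, conditional truncation, pad loop) are fused into one left-to-right scan with an accumulator that filters, collapses dot runs, drops leading dots and stops once 15 characters are collected, followed only by a trailing-dot pop loop, the empty guard and the pad loop. (no quadratic string concatenation; the scan stops after 15 kept characters)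
import Mathlib
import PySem

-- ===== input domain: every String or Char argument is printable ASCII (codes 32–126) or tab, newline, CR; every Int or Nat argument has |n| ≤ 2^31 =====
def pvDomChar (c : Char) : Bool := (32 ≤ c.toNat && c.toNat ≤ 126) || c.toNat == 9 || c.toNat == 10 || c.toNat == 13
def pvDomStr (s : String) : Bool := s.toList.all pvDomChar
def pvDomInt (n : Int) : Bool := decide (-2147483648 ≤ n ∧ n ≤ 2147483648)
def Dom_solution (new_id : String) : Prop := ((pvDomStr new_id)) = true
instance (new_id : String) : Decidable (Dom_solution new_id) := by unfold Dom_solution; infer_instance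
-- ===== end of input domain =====

-- B fuses A's staged passes (filter, dot-collapse while-loop, leading/trailing one-dot
-- strips, conditional truncation, pad loop) into one scan with an accumulator that
-- filters, collapses dots, drops leading dots and stops at 15 chars, then a pop loop,
-- the empty guard and padding; objective: simpler. Equivalence of the RETURN value.

-- ===== PORT A =====

-- for i in range(n): answer += new_id[i] (kept iff alnum or in ['-','_','.'])
def pvFilterA (l : List Char) : List Char :=
  l.foldl (fun answer c =>
    if PySem.Chars.isalnum c then answer ++ [c]
    else if ['-', '_', '.'].contains c then answer ++ [c]
    else answer) []

-- inner while: while idx < len(answer) and answer[idx] == '.': idx += 1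
def pvSkipDots : List Char → List Char
  | [] => []
  | c :: r => if c = '.' then pvSkipDots r else c :: r

theorem pvSkipDots_length_le (l : List Char) : (pvSkipDots l).length ≤ l.length := by
  induction l with
  | nil => simp [pvSkipDots]
  | cons c r ih =>
    simp only [pvSkipDots]
    split
    · simp; omega
    · simp

-- outer while building tmp (copies one '.', skips the rest of the run; copies other chars)
def pvDedupA : List Char → List Char
  | [] => []
  | c :: r => if c = '.' then '.' :: pvDedupA (pvSkipDots r) else c :: pvDedupA r
termination_by l => l.length
decreasing_by
  · have := pvSkipDots_length_le r; simp; omega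
  · simp

-- if tmp and tmp[0] == '.': tmp = "" if len(tmp) == 1 else tmp[1:]
def pvStripLeadA (tmp : List Char) : List Char :=
  if tmp.head? = some '.' then (if tmp.length = 1 then [] else tmp.tail) else tmp

-- if tmp and tmp[-1] == '.': tmp = "" if len(tmp) == 1 else tmp[:-1]
def pvStripTrailA (tmp : List Char) : List Char :=
  if tmp.getLast? = some '.' then (if tmp.length = 1 then [] else tmp.dropLast) else tmp

-- while len(answer) <= 2: answer.append(tmp[-1])   (tmp[-1]: tmp is provably nonempty here,
-- the getLastD default is unreachable)
def pvPadA (tmp : List Char) (answer : List Char) : List Char :=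
  if answer.length ≤ 2 then pvPadA tmp (answer ++ [tmp.getLastD 'a']) else answer
termination_by 3 - answer.length
decreasing_by simp; omega

def solution (new_id : String) : String :=
  let lowered := PySem.Chars.lower new_id.toList
  let answer := pvFilterA lowered
  let tmp := pvDedupA answer
  let tmp := pvStripLeadA tmp
  let tmp := pvStripTrailA tmp
  let tmp := if tmp = [] then ['a'] else tmp
  let tmp := if 16 ≤ tmp.length then tmp.take 15 else tmp
  let tmp := if tmp.getLast? = some '.' then tmp.dropLast else tmp
  String.ofList (pvPadA tmp tmp)

-- ===== PORT B =====

-- the single scan: for c in new_id.lower(): break at len(out)==15; keep alnum/-_.;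
-- skip '.' when out is empty or ends with '.'; else append
def pvScanB : List Char → List Char → List Char
  | out, [] => out
  | out, c :: r =>
    if out.length = 15 then out
    else if PySem.Chars.isalnum c || ['-', '_', '.'].contains c then
      if c = '.' ∧ (out = [] ∨ out.getLast? = some '.') then pvScanB out r
      else pvScanB (out ++ [c]) r
    else pvScanB out r

-- while out and out[-1] == '.': out.pop()
def pvRstripB (l : List Char) : List Char :=
  if l.getLast? = some '.' then pvRstripB l.dropLast else l
termination_by l.length
decreasing_by
  rename_i h
  have hne : l ≠ [] := by intro h0; subst h0; simp at h
  have := List.length_pos_of_ne_nil hne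
  simp [List.length_dropLast]; omega

-- while len(out) < 3: out.append(out[-1])   (out provably nonempty here)
def pvPadB (out : List Char) : List Char :=
  if out.length < 3 then pvPadB (out ++ [out.getLastD 'a']) else out
termination_by 3 - out.length
decreasing_by simp; omega

def solution_alt (new_id : String) : String :=
  let out := pvScanB [] (PySem.Chars.lower new_id.toList)
  let out := pvRstripB out
  let out := if out = [] then ['a'] else out
  String.ofList (pvPadB out)

-- ===== PRECONDITION & SPEC =====
def Spec_solution (new_id : String) (out : String) : Prop := out = solution_alt new_id
instance (new_id : String) (out : String) : Decidable (Spec_solution new_id out) := by unfold Spec_solution; infer_instance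

-- ===== CLAIM (what is proved, stated in full; the proofs are below) =====
def Claim_equal_solution : Prop := ∀ (new_id : String), Dom_solution new_id → Spec_solution new_id (solution new_id)

-- ===== LEMMAS AND PROOFS =====

-- proof-only reference function: collapse maximal dot runs to a single dot
def pvCollapseDots (l : List Char) : List Char :=
  l.foldr (fun c acc => if c = '.' ∧ acc.head? = some '.' then acc else c :: acc) []

-- proof-only reference scan: pvProc b l = collapsed filtered stream, with leading dots
-- suppressed while b = true
def pvProc : Bool → List Char → List Char
  | _, [] => []
  | b, c :: r =>
    if PySem.Chars.isalnum c || ['-', '_', '.'].contains c then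
      if c = '.' then (if b then pvProc true r else '.' :: pvProc true r)
      else c :: pvProc false r
    else pvProc b r

-- A's two keep-branches are one filter
theorem pvFilterA_eq (l : List Char) :
    pvFilterA l = l.filter (fun c => PySem.Chars.isalnum c || ['-', '_', '.'].contains c) := by
  have h := PySem.List.foldl_append_if
    (fun c => PySem.Chars.isalnum c || ['-', '_', '.'].contains c) (id : Char → Char) l []
  simp only [List.map_id, List.nil_append, id_eq] at h
  rw [pvFilterA, ← h]
  congr 1
  funext answer c
  by_cases h1 : PySem.Chars.isalnum c
  · simp [h1]
  · by_cases h2 : ['-', '_', '.'].contains c <;> simp [h1]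

theorem pvSkipDots_eq (l : List Char) : pvSkipDots l = l.dropWhile (· == '.') := by
  induction l with
  | nil => rfl
  | cons c r ih =>
    simp only [pvSkipDots, List.dropWhile_cons]
    by_cases h : c = '.' <;> simp [h, ih]

theorem pvCollapseDots_cons (c : Char) (r : List Char) :
    pvCollapseDots (c :: r) =
      if c = '.' ∧ (pvCollapseDots r).head? = some '.' then pvCollapseDots r
      else c :: pvCollapseDots r := rfl

theorem pvCollapseDots_cons_ne {c : Char} (r : List Char) (h : c ≠ '.') :
    pvCollapseDots (c :: r) = c :: pvCollapseDots r := by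
  rw [pvCollapseDots_cons]; simp [h]

theorem pvCollapseDots_cons_dot (r : List Char) :
    pvCollapseDots ('.' :: r) = '.' :: pvCollapseDots (r.dropWhile (· == '.')) := by
  induction r with
  | nil => rfl
  | cons c r' ih =>
    by_cases h : c = '.'
    · subst h
      rw [List.dropWhile_cons_of_pos (by simp)] at *
      rw [pvCollapseDots_cons]
      have hh : (pvCollapseDots ('.' :: r')).head? = some '.' := by rw [ih]; rfl
      rw [if_pos ⟨rfl, hh⟩]
      exact ih
    · rw [List.dropWhile_cons_of_neg (by simp [h]), pvCollapseDots_cons_ne r' h,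
        pvCollapseDots_cons '.' (c :: r'), pvCollapseDots_cons_ne r' h]
      simp [h]

theorem pvDedupA_eq_aux : ∀ (n : Nat) (l : List Char), l.length ≤ n →
    pvDedupA l = pvCollapseDots l := by
  intro n
  induction n with
  | zero => intro l hl; rw [List.length_eq_zero_iff.mp (Nat.le_zero.mp hl)]; simp [pvDedupA, pvCollapseDots]
  | succ n ih =>
    intro l hl
    match l with
    | [] => simp [pvDedupA, pvCollapseDots]
    | c :: r =>
      simp only [List.length_cons, Nat.succ_le_succ_iff] at hl
      by_cases h : c = '.'
      · subst h
        rw [pvDedupA, if_pos rfl, pvSkipDots_eq, pvCollapseDots_cons_dot]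
        congr 1
        exact ih _ (le_trans (List.length_dropWhile_le _ _) hl)
      · rw [pvDedupA, if_neg h, pvCollapseDots_cons_ne r h, ih r hl]

theorem pvDedupA_eq (l : List Char) : pvDedupA l = pvCollapseDots l :=
  pvDedupA_eq_aux l.length l le_rfl

-- no two adjacent dots
def pvNDD (l : List Char) : Prop := List.IsChain (fun a b => ¬(a = '.' ∧ b = '.')) l

theorem pvNDD_collapse (l : List Char) : pvNDD (pvCollapseDots l) := by
  induction l with
  | nil => exact List.IsChain.nil
  | cons c r ih =>
    rw [pvCollapseDots_cons]
    split
    · exact ih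
    · rename_i hcond
      rw [pvNDD, List.isChain_cons]
      refine ⟨?_, ih⟩
      intro y hy hcy
      have hh : (pvCollapseDots r).head? = some y := hy
      exact hcond ⟨hcy.1, by rw [hh, hcy.2]⟩

theorem pvNDD_reverse {l : List Char} (h : pvNDD l) : pvNDD l.reverse := by
  rw [pvNDD, List.isChain_reverse]
  exact h.imp (fun a b hab hc => hab ⟨hc.2, hc.1⟩)

-- one-leading-dot strip = lstrip('.') on a collapsed list
theorem pvStripLeadA_eq {l : List Char} (h : pvNDD l) :
    pvStripLeadA l = l.dropWhile (· == '.') := by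
  match l with
  | [] => rfl
  | c :: r =>
    by_cases hc : c = '.'
    · subst hc
      have hr : r.dropWhile (· == '.') = r := by
        match r with
        | [] => rfl
        | c' :: r' =>
          rw [pvNDD, List.isChain_cons] at h
          have : ¬('.' = '.' ∧ c' = '.') := h.1 c' rfl
          have hc' : c' ≠ '.' := fun he => this ⟨rfl, he⟩
          exact List.dropWhile_cons_of_neg (by simp [hc'])
      rw [List.dropWhile_cons_of_pos (by simp), hr, pvStripLeadA, if_pos (by simp)]
      by_cases h1 : ('.' :: r).length = 1
      · rw [if_pos h1]
        simp only [List.length_cons, Nat.add_eq_right] at h1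
        rw [List.length_eq_zero_iff.mp h1]
      · rw [if_neg h1]; rfl
    · rw [pvStripLeadA, List.dropWhile_cons_of_neg (by simp [hc])]
      simp [hc]

-- drop-one-trailing-dot = rstrip('.') on a collapsed list
theorem pvRstrip_eq {l : List Char} (h : pvNDD l) :
    (if l.getLast? = some '.' then l.dropLast else l) =
      (l.reverse.dropWhile (· == '.')).reverse := by
  have hlead := pvStripLeadA_eq (pvNDD_reverse h)
  rw [pvStripLeadA, List.head?_reverse] at hlead
  by_cases hg : l.getLast? = some '.'
  · rw [if_pos hg] at hlead ⊢
    by_cases h1 : l.reverse.length = 1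
    · rw [if_pos h1] at hlead
      obtain ⟨a, ha⟩ : ∃ a, l = [a] := by
        match l, (by simpa using h1 : l.length = 1) with
        | [a], _ => exact ⟨a, rfl⟩
      subst ha
      rw [← hlead]
      rfl
    · rw [if_neg h1] at hlead
      rw [← hlead, List.tail_reverse, List.reverse_reverse]
  · rw [if_neg hg] at hlead ⊢
    rw [← hlead, List.reverse_reverse]

-- trailing A-strip (with its length-1 branch) agrees with rstrip on collapsed lists
theorem pvStripTrailA_eq {l : List Char} (h : pvNDD l) :
    pvStripTrailA l = (l.reverse.dropWhile (· == '.')).reverse := by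
  rw [← pvRstrip_eq h, pvStripTrailA]
  by_cases hg : l.getLast? = some '.'
  · rw [if_pos hg, if_pos hg]
    by_cases h1 : l.length = 1
    · rw [if_pos h1]
      obtain ⟨a, ha⟩ : ∃ a, l = [a] := by
        match l, h1 with
        | [a], _ => exact ⟨a, rfl⟩
      subst ha
      rfl
    · rw [if_neg h1]
  · rw [if_neg hg, if_neg hg]

theorem pvNDD_suffix {l l' : List Char} (h : pvNDD l) (hs : l' <:+ l) : pvNDD l' :=
  List.IsChain.suffix h hs

theorem pvNDD_prefix {l l' : List Char} (h : pvNDD l) (hs : l' <+: l) : pvNDD l' :=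
  List.IsChain.prefix h hs

-- heads and dropWhile on dots
theorem pvCollapse_head (l : List Char) : (pvCollapseDots l).head? = l.head? := by
  match l with
  | [] => rfl
  | c :: r =>
    by_cases h : c = '.'
    · subst h; rw [pvCollapseDots_cons_dot]; rfl
    · rw [pvCollapseDots_cons_ne r h]; rfl

theorem pvDropWhile_head_false (l : List Char) :
    (l.dropWhile (· == '.')).head? ≠ some '.' := by
  induction l with
  | nil => simp
  | cons c r ih =>
    by_cases h : c = '.'
    · rw [List.dropWhile_cons_of_pos (by simp [h])]; exact ih
    · rw [List.dropWhile_cons_of_neg (by simp [h])]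
      simp [h]

theorem pvDropWhile_of_head {l : List Char} (h : l.head? ≠ some '.') :
    l.dropWhile (· == '.') = l := by
  match l with
  | [] => rfl
  | c :: r =>
    have hc : c ≠ '.' := by intro he; exact h (by simp [he])
    exact List.dropWhile_cons_of_neg (by simp [hc])

theorem pvCollapse_dropWhile (l : List Char) :
    (pvCollapseDots l).dropWhile (· == '.') = pvCollapseDots (l.dropWhile (· == '.')) := by
  match l with
  | [] => rfl
  | c :: r =>
    by_cases h : c = '.'
    · subst h
      rw [pvCollapseDots_cons_dot, List.dropWhile_cons_of_pos (by simp),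
        List.dropWhile_cons_of_pos (by simp)]
      refine (pvDropWhile_of_head ?_)
      rw [pvCollapse_head]
      exact pvDropWhile_head_false r
    · rw [pvCollapseDots_cons_ne r h, List.dropWhile_cons_of_neg (by simp [h]),
        List.dropWhile_cons_of_neg (by simp [h]), pvCollapseDots_cons_ne r h]

-- step equations for the reference scan
theorem pvProc_dot_t (r : List Char) : pvProc true ('.' :: r) = pvProc true r := by
  simp [pvProc]

theorem pvProc_dot_f (r : List Char) : pvProc false ('.' :: r) = '.' :: pvProc true r := by
  simp [pvProc]

theorem pvProc_keep {c : Char} (b : Bool) (r : List Char)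
    (hk : (PySem.Chars.isalnum c || ['-', '_', '.'].contains c) = true) (hc : c ≠ '.') :
    pvProc b (c :: r) = c :: pvProc false r := by
  simp only [pvProc]; rw [if_pos hk, if_neg hc]

theorem pvProc_skip {c : Char} (b : Bool) (r : List Char)
    (hk : ¬ (PySem.Chars.isalnum c || ['-', '_', '.'].contains c) = true) :
    pvProc b (c :: r) = pvProc b r := by
  simp only [pvProc]; rw [if_neg hk]

-- the reference scan computes collapse∘filter (with leading dots dropped when b = true)
theorem pvProc_eq (l : List Char) :
    pvProc false l = pvCollapseDots (l.filter
        (fun c => PySem.Chars.isalnum c || ['-', '_', '.'].contains c)) ∧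
    pvProc true l = (pvCollapseDots (l.filter
        (fun c => PySem.Chars.isalnum c || ['-', '_', '.'].contains c))).dropWhile (· == '.') := by
  induction l with
  | nil => exact ⟨rfl, rfl⟩
  | cons c r ih =>
    by_cases hk : (PySem.Chars.isalnum c || ['-', '_', '.'].contains c) = true
    · have hf : (c :: r).filter (fun c => PySem.Chars.isalnum c || ['-', '_', '.'].contains c) =
          c :: r.filter (fun c => PySem.Chars.isalnum c || ['-', '_', '.'].contains c) := by
        simp only [List.filter_cons, hk, if_true]
      rw [hf]
      by_cases hc : c = '.'
      · subst hc
        constructor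
        · rw [pvProc_dot_f, ih.2, pvCollapse_dropWhile, pvCollapseDots_cons_dot]
        · rw [pvProc_dot_t, ih.2, pvCollapse_dropWhile, pvCollapseDots_cons_dot,
            List.dropWhile_cons_of_pos (by simp)]
          exact (pvDropWhile_of_head (by
            rw [pvCollapse_head]; exact pvDropWhile_head_false _)).symm
      · rw [pvCollapseDots_cons_ne _ hc]
        constructor
        · rw [pvProc_keep false r hk hc, ih.1]
        · rw [pvProc_keep true r hk hc, ih.1, List.dropWhile_cons_of_neg (by simp [hc])]
    · have hf : (c :: r).filter (fun c => PySem.Chars.isalnum c || ['-', '_', '.'].contains c) =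
          r.filter (fun c => PySem.Chars.isalnum c || ['-', '_', '.'].contains c) := by
        simp only [List.filter_cons, if_neg hk]
      rw [hf]
      exact ⟨by rw [pvProc_skip false r hk, ih.1],
        by rw [pvProc_skip true r hk, ih.2]⟩

-- B's scan = take 15 of the reference scan
theorem pvScanB_eq : ∀ (l out : List Char) (b : Bool), out.length ≤ 15 →
    (b = true ↔ (out = [] ∨ out.getLast? = some '.')) →
    pvScanB out l = (out ++ pvProc b l).take 15 := by
  intro l
  induction l with
  | nil =>
    intro out b hlen _
    show out = (out ++ pvProc b []).take 15
    have h0 : pvProc b [] = [] := by cases b <;> rfl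
    rw [h0, List.append_nil, List.take_of_length_le hlen]
  | cons c r ih =>
    intro out b hlen hb
    by_cases h15 : out.length = 15
    · rw [pvScanB, if_pos h15, List.take_append, h15]
      simp [List.take_of_length_le (le_of_eq h15)]
    · rw [pvScanB, if_neg h15]
      by_cases hk : (PySem.Chars.isalnum c || ['-', '_', '.'].contains c) = true
      · rw [if_pos hk]
        by_cases hc : c = '.'
        · subst hc
          by_cases hbl : out = [] ∨ out.getLast? = some '.'
          · rw [if_pos ⟨rfl, hbl⟩]
            have hbt : b = true := hb.mpr hbl
            subst hbt
            rw [pvProc_dot_t]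
            exact ih out true hlen hb
          · rw [if_neg (fun hcon => hbl hcon.2)]
            have hbf : b = false := by
              cases b with
              | false => rfl
              | true => exact absurd (hb.mp rfl) hbl
            subst hbf
            rw [pvProc_dot_f,
              ih (out ++ ['.']) true (by simp; omega) (by simp),
              List.append_assoc]
            rfl
        · rw [if_neg (fun hcon => hc hcon.1), pvProc_keep b r hk hc,
            ih (out ++ [c]) false (by simp; omega) (by simp [hc]),
            List.append_assoc]
          rfl
      · rw [if_neg hk, pvProc_skip b r hk]
        exact ih out b hlen hb

-- B's pop loop = rstrip('.')
theorem pvRstripB_eq (l : List Char) :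
    pvRstripB l = (l.reverse.dropWhile (· == '.')).reverse := by
  induction l using List.reverseRecOn with
  | nil => rw [pvRstripB]; simp
  | append_singleton l a ih =>
    by_cases h : a = '.'
    · subst h
      rw [pvRstripB, if_pos (by simp), List.dropLast_concat, ih]
      simp
    · rw [pvRstripB, if_neg (by simp [h])]
      rw [List.reverse_append]
      simp [h]

-- pad loops = append replicate
theorem pvPadA_eq_aux (tmp : List Char) : ∀ (n : Nat) (ans : List Char), 3 - ans.length ≤ n →
    pvPadA tmp ans = ans ++ List.replicate (3 - ans.length) (tmp.getLastD 'a') := by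
  intro n
  induction n with
  | zero =>
    intro ans h
    have : ¬ ans.length ≤ 2 := by omega
    rw [pvPadA, if_neg this]
    have : 3 - ans.length = 0 := by omega
    simp [this]
  | succ n ih =>
    intro ans h
    by_cases hle : ans.length ≤ 2
    · rw [pvPadA, if_pos hle]
      rw [ih (ans ++ [tmp.getLastD 'a']) (by simp; omega)]
      have h3 : 3 - ans.length = (3 - (ans.length + 1)) + 1 := by omega
      simp only [List.length_append, List.length_cons, List.length_nil]
      rw [h3, List.replicate_succ, List.append_assoc]
      rfl
    · rw [pvPadA, if_neg hle]
      have : 3 - ans.length = 0 := by omega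
      simp [this]

theorem pvPadA_eq (tmp ans : List Char) :
    pvPadA tmp ans = ans ++ List.replicate (3 - ans.length) (tmp.getLastD 'a') :=
  pvPadA_eq_aux tmp _ ans le_rfl

theorem pvPadB_eq_aux : ∀ (n : Nat) (ans : List Char), 3 - ans.length ≤ n →
    pvPadB ans = ans ++ List.replicate (3 - ans.length) (ans.getLastD 'a') := by
  intro n
  induction n with
  | zero =>
    intro ans h
    have : ¬ ans.length < 3 := by omega
    rw [pvPadB, if_neg this]
    have : 3 - ans.length = 0 := by omega
    simp [this]
  | succ n ih =>
    intro ans h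
    by_cases hlt : ans.length < 3
    · rw [pvPadB, if_pos hlt]
      rw [ih (ans ++ [ans.getLastD 'a']) (by simp; omega)]
      rw [List.getLastD_concat]
      have h3 : 3 - ans.length = (3 - (ans.length + 1)) + 1 := by omega
      simp only [List.length_append, List.length_cons, List.length_nil]
      rw [h3, List.replicate_succ, List.append_assoc]
      rfl
    · rw [pvPadB, if_neg hlt]
      have : 3 - ans.length = 0 := by omega
      simp [this]

theorem pvPadB_eq (ans : List Char) :
    pvPadB ans = ans ++ List.replicate (3 - ans.length) (ans.getLastD 'a') :=
  pvPadB_eq_aux _ ans le_rfl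

-- rstrip of a list with a non-dot head is nonempty (unless the list is empty)
theorem pvRstrip_ne_nil {x : List Char} (hx : x ≠ []) (hh : x.head? ≠ some '.') :
    (x.reverse.dropWhile (· == '.')).reverse ≠ [] := by
  intro h0
  have h1 : x.reverse.dropWhile (· == '.') = [] := by
    have := congrArg List.reverse h0
    simpa using this
  rw [List.dropWhile_eq_nil_iff] at h1
  match x, hx with
  | c :: r, _ =>
    have hc : (c == '.') = true := h1 c (by simp)
    exact hh (by simp at hc; simp [hc])

-- the core: A's strip/guard/truncate/strip chain = B's truncate-then-rstrip chain,
-- on collapsed lists with no leading dot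
theorem pvCore (x : List Char) (hN : pvNDD x) (hh : x.head? ≠ some '.') :
    (let u := pvStripTrailA x
     let u' := if u = [] then ['a'] else u
     let v := if 16 ≤ u'.length then u'.take 15 else u'
     if v.getLast? = some '.' then v.dropLast else v) =
    (let t := ((x.take 15).reverse.dropWhile (· == '.')).reverse
     if t = [] then ['a'] else t) := by
  simp only
  by_cases hlen : x.length ≤ 15
  · rw [List.take_of_length_le hlen]
    rw [pvStripTrailA_eq hN]
    by_cases hx0 : x = []
    · subst hx0; decide
    · have hRne := pvRstrip_ne_nil hx0 hh
      rw [if_neg hRne]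
      have hlenR : ((x.reverse.dropWhile (· == '.')).reverse).length ≤ 15 := by
        calc ((x.reverse.dropWhile (· == '.')).reverse).length
            ≤ x.reverse.length := by
              rw [List.length_reverse]; exact List.length_dropWhile_le _ _
          _ ≤ 15 := by rw [List.length_reverse]; exact hlen
      have h16n : ¬ 16 ≤ ((x.reverse.dropWhile (· == '.')).reverse).length := by omega
      rw [if_neg h16n]
      have hgln : ((x.reverse.dropWhile (· == '.')).reverse).getLast? ≠ some '.' := by
        rw [List.getLast?_reverse]
        exact pvDropWhile_head_false _
      rw [if_neg hgln]
  · -- x.length ≥ 16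
    have hx0 : x ≠ [] := by intro h0; subst h0; simp at hlen
    have h16 : 16 ≤ x.length := by omega
    have hu1 : pvStripTrailA x = if x.getLast? = some '.' then x.dropLast else x := by
      rw [pvStripTrailA_eq hN, ← pvRstrip_eq hN]
    -- v = x.take 15 in every case
    have hv : (let u := pvStripTrailA x
               let u' := if u = [] then ['a'] else u
               if 16 ≤ u'.length then u'.take 15 else u') = x.take 15 := by
      simp only
      rw [hu1]
      by_cases hgl : x.getLast? = some '.'
      · rw [if_pos hgl]
        have hld : x.dropLast.length = x.length - 1 := List.length_dropLast
        have hne : x.dropLast ≠ [] := by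
          intro h0
          have := congrArg List.length h0
          rw [hld] at this
          simp at this
          omega
        rw [if_neg hne]
        by_cases h16' : 16 ≤ x.dropLast.length
        · rw [if_pos h16', List.dropLast_eq_take, List.take_take]
          congr 1
          omega
        · rw [if_neg h16', List.dropLast_eq_take]
          congr 1
          omega
      · have h16'' : 16 ≤ x.length := h16
        rw [if_neg hgl, if_neg hx0, if_pos h16'']
    simp only at hv
    rw [hv]
    have hNt : pvNDD (x.take 15) := pvNDD_prefix hN (List.take_prefix _ _)
    rw [pvRstrip_eq hNt]
    have htne : ((x.take 15).reverse.dropWhile (· == '.')).reverse ≠ [] := by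
      refine pvRstrip_ne_nil ?_ ?_
      · intro h0
        have hl : (x.take 15).length = 0 := by rw [h0]; rfl
        rw [List.length_take] at hl
        omega
      · have hht : (x.take 15).head? = x.head? := by
          match x, hx0 with
          | c :: r, _ => rfl
        rw [hht]
        exact hh
    rw [if_neg htne]

-- ===== VERDICT (by name: the statement is the Claim_ definition above) =====
theorem solution_spec : Claim_equal_solution := by
  intro new_id _
  unfold Spec_solution solution solution_alt
  simp only [pvFilterA_eq, pvDedupA_eq]
  set lowered := PySem.Chars.lower new_id.toList with hlow
  -- B's scan = take 15 of the lead-stripped collapsed filtered stream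
  have hscan : pvScanB [] lowered =
      ((pvCollapseDots (lowered.filter
        (fun c => PySem.Chars.isalnum c || ['-', '_', '.'].contains c))).dropWhile (· == '.')).take 15 := by
    rw [pvScanB_eq lowered [] true (by simp) (by simp), (pvProc_eq lowered).2]
    simp
  rw [hscan, pvRstripB_eq]
  -- A's lead strip = dropWhile
  have hC : pvNDD (pvCollapseDots (lowered.filter
      (fun c => PySem.Chars.isalnum c || ['-', '_', '.'].contains c))) := pvNDD_collapse _
  rw [pvStripLeadA_eq hC]
  set x := (pvCollapseDots (lowered.filter
      (fun c => PySem.Chars.isalnum c || ['-', '_', '.'].contains c))).dropWhile (· == '.') with hx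
  have hNx : pvNDD x := pvNDD_suffix hC (List.dropWhile_suffix _)
  have hhx : x.head? ≠ some '.' := pvDropWhile_head_false _
  have hcore := pvCore x hNx hhx
  simp only at hcore
  rw [hcore, pvPadA_eq, pvPadB_eq]
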